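-- pv_equiv track=rewrite | github.com/So-Myoung/algorithm-exercises-python | 자료구조/2_스택/2_4.py | solution
-- ===== SOURCE A (Python) =====
-- def solution(board, moves):
--     stack = [[] for _ in range(len(board[0]))]
--     basket = []
--     res = 0
--
--     # board 배열을 역순으로 탐색하여 문제에 맞게 스택 형태 변환
--     for row in range(len(board) - 1, -1, -1):
--         for col in range(len(board[0])):
--             if board[row][col]:
--                 stack[col].append(board[row][col])
--
--     # moves
--     for n in moves:
--         if stack[n - 1]:
--             d = stack[n - 1].pop()
--
--             if basket and basket[-1] == d:
--                 basket.pop()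
--                 res += 2
--             else:
--                 basket.append(d)
--
--     return(res)
-- ===== SOURCE B (Python) =====
-- def solution(board, moves):
--     # Lazy column pointers instead of pre-built stacks: no board copy, no board mutation.
--     rows = len(board)
--     ptr = [0] * len(board[0])   # next row to inspect in each column (0 = top)
--     basket = []
--     res = 0
--     for n in moves:
--         c = n - 1
--         p = ptr[c]
--         while p < rows and not board[p][c]:
--             p += 1
--         if p < rows:
--             d = board[p][c]
--             ptr[c] = p + 1
--             if basket and basket[-1] == d:
--                 basket.pop()
--                 res += 2
--             else:
--                 basket.append(d)
--         else:
--             ptr[c] = p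
--     return res
-- ===== Notes on version B (the rewrite author's own statement) =====
-- stated objective: alternative
-- what changed: Instead of pre-building per-column stacks by a reversed full scan of the board, B keeps one lazy row-pointer per column that advances down the unmutated board only when that column is picked; Pre_ excludes the combination of non-positive move numbers with rows wider than board[0], where A's negative wraparound over its pre-truncated column stacks and B's direct negative row indexing each select a defensible column.
-- outside the precondition, e.g. on solution([[1, 2], [3, 2, 9]], [0, 0]): A returns 2, B returns 0
import Mathlib
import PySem

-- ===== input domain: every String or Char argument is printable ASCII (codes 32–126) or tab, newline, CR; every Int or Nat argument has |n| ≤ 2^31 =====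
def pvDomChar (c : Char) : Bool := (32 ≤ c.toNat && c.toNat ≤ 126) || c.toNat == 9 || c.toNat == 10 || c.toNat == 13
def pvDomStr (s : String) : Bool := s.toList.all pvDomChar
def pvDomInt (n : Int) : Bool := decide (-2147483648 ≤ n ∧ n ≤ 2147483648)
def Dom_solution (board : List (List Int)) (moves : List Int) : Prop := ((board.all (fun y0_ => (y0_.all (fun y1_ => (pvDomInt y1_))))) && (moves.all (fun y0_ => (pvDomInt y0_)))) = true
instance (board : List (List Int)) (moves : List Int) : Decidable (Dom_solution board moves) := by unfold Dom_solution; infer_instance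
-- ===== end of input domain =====

-- B replaces A's up-front reversed scan building per-column stacks by lazy per-column row
-- pointers that advance down the unmutated board on demand (alternative decomposition; A
-- mutates only its local lists, so the equivalence claimed is about the return value).


-- ===== PORT A =====
-- the two nested build loops: for row in range(len(board)-1,-1,-1): for col in range(len(board[0])): …
def buildA (board : List (List Int)) : List (List Int) :=
  let C : Int := ((board.headD []).length : Int)      -- len(board[0]); Pre_ requires board ≠ []
  let stack0 : List (List Int) := (PySem.List.pyRange 0 C 1).map (fun _ => ([] : List Int))
  (PySem.List.pyRange ((board.length : Int) - 1) (-1) (-1)).foldl (fun st row =>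
    (PySem.List.pyRange 0 C 1).foldl (fun st2 col =>
      let v := PySem.List.pyGetD (PySem.List.pyGetD board row []) col 0
      if v ≠ 0 then
        PySem.List.pySetD st2 col (PySem.List.pyGetD st2 col [] ++ [v])
      else st2) st) stack0

-- the body of `for n in moves: …`  (state: stacks, basket, res)
def stepA (acc : List (List Int) × List Int × Int) (n : Int) : List (List Int) × List Int × Int :=
  let (stack, basket, res) := acc
  let s := PySem.List.pyGetD stack (n - 1) []
  if s ≠ [] then
    let d := PySem.List.pyGetD s (-1) 0              -- d = stack[n-1].pop()
    let stack' := PySem.List.pySetD stack (n - 1) s.dropLast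
    if basket ≠ [] ∧ PySem.List.pyGetD basket (-1) 0 = d then
      (stack', basket.dropLast, res + 2)
    else
      (stack', basket ++ [d], res)
  else acc

def solution (board : List (List Int)) (moves : List Int) : Int :=
  (moves.foldl stepA (buildA board, ([] : List Int), (0 : Int))).2.2

-- ===== PORT B =====
-- while p < rows and not board[p][c]: p += 1
def advB (board : List (List Int)) (c : Int) (p : Nat) : Nat :=
  if h : p < board.length then
    if PySem.List.pyGetD (board[p]'h) c 0 = 0 then advB board c (p + 1) else p
  else p
termination_by board.length - p

-- the body of B's `for n in moves: …`  (state: column pointers, basket, res)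
def stepB (board : List (List Int)) (acc : List Nat × List Int × Int) (n : Int) :
    List Nat × List Int × Int :=
  let (ptr, basket, res) := acc
  let c : Int := n - 1
  let p := advB board c (PySem.List.pyGetD ptr c 0)
  if h : p < board.length then
    let d := PySem.List.pyGetD (board[p]'h) c 0
    let ptr' := PySem.List.pySetD ptr c (p + 1)
    if basket ≠ [] ∧ PySem.List.pyGetD basket (-1) 0 = d then
      (ptr', basket.dropLast, res + 2)
    else
      (ptr', basket ++ [d], res)
  else (PySem.List.pySetD ptr c p, basket, res)

def solution_alt (board : List (List Int)) (moves : List Int) : Int :=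
  let ptr0 : List Nat := List.replicate (board.headD []).length 0    -- ptr = [0] * len(board[0])
  (moves.foldl (stepB board) (ptr0, ([] : List Int), (0 : Int))).2.2

-- ===== PRECONDITION & SPEC =====
-- Pre_ is the set of inputs on which the Python A returns (board nonempty, every row at least
-- len(board[0]) wide, every move's index n-1 a valid Python index into the len(board[0]) column
-- stacks), MINUS one excluded corner: non-positive move numbers combined with rows wider than
-- board[0], where A's negative wraparound over its pre-truncated column stacks and B's direct
-- negative row indexing each select a defensible column.
def Pre_solution (board : List (List Int)) (moves : List Int) : Prop :=
  board ≠ [] ∧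
  (∀ row ∈ board, (board.headD []).length ≤ row.length) ∧
  (∀ n ∈ moves, -((board.headD []).length : Int) ≤ n - 1 ∧ n - 1 < ((board.headD []).length : Int)) ∧
  ((∃ n ∈ moves, n ≤ 0) → ∀ row ∈ board, row.length = (board.headD []).length)
instance (board : List (List Int)) (moves : List Int) : Decidable (Pre_solution board moves) := by
  unfold Pre_solution; infer_instance

def pvWitness_solution : List (List Int) × List Int := ([[0, 3], [1, 3]], [1, 2, 2, 1])

def Spec_solution (board : List (List Int)) (moves : List Int) (out : Int) : Prop := out = solution_alt board moves
instance (board : List (List Int)) (moves : List Int) (out : Int) : Decidable (Spec_solution board moves out) := by unfold Spec_solution; infer_instance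

-- ===== CLAIM (what is proved, stated in full; the proofs are below) =====
def Claim_equal_solution : Prop := ∀ (board : List (List Int)) (moves : List Int), Dom_solution board moves → Pre_solution board moves → Spec_solution board moves (solution board moves)

-- ===== LEMMAS AND PROOFS =====

-- the truthy entries of column j, top row first
def colT (rows : List (List Int)) (j : Nat) : List Int :=
  rows.filterMap (fun row => if row.getD j 0 ≠ 0 then some (row.getD j 0) else none)

-- unified in-range index lemmas (Python's negative wrap), proved from the PySem definitions
lemma pyGetD_inrange {α : Type} (xs : List α) (i : Int) (d : α)
    (h1 : -(xs.length : Int) ≤ i) (h2 : i < (xs.length : Int)) :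
    PySem.List.pyGetD xs i d = xs.getD (if i < 0 then i + xs.length else i).toNat d := by
  simp only [PySem.List.pyGetD, PySem.List.pyGet?, PySem.List.pyIdx?, List.getD]
  split_ifs with h3 h4 h5 <;> try omega
  · simp
  · have : (xs.length - (-i).toNat) = (i + ↑xs.length).toNat := by omega
    simp [this]

lemma pySetD_inrange {α : Type} (xs : List α) (i : Int) (v : α)
    (h1 : -(xs.length : Int) ≤ i) (h2 : i < (xs.length : Int)) :
    PySem.List.pySetD xs i v = xs.set (if i < 0 then i + xs.length else i).toNat v := by
  simp only [PySem.List.pySetD, PySem.List.pySet?, PySem.List.pyIdx?]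
  split_ifs with h3 h4 h5 <;> try omega
  · simp
  · have : (xs.length - (-i).toNat) = (i + ↑xs.length).toNat := by omega
    simp [this]

lemma getD_map_const {α β : Type} (l : List α) (c : β) (j : Nat) :
    (l.map (fun _ => c)).getD j c = c := by
  simp only [List.getD, List.getElem?_map]
  cases l[j]? <;> simp

lemma getD_replicate {β : Type} (k j : Nat) (c : β) :
    (List.replicate k c).getD j c = c := by
  simp only [List.getD, List.getElem?_replicate]
  split_ifs <;> simp

lemma getD_set {α : Type} (l : List α) (i j : Nat) (v d : α) (hi : i < l.length) :
    (l.set i v).getD j d = if i = j then v else l.getD j d := by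
  simp only [List.getD, List.getElem?_set]
  split_ifs with h <;> simp

-- for a non-negative index, Python's xs[i]-with-default agrees with List.getD
lemma pyGetD_nonneg_getD {α : Type} (xs : List α) (i : Int) (d : α) (h : 0 ≤ i) :
    PySem.List.pyGetD xs i d = xs.getD i.toNat d := by
  simp only [PySem.List.pyGetD, PySem.List.pyGet?, PySem.List.pyIdx?, List.getD]
  split_ifs with h1 h2 <;> try omega
  · simp
  · rw [List.getElem?_eq_none (by omega)]
    simp

lemma colT_drop_cons (board : List (List Int)) (c p : Nat) (h : p < board.length) :
    colT (board.drop p) c =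
      (if (board[p]'h).getD c 0 ≠ 0 then [(board[p]'h).getD c 0] else []) ++ colT (board.drop (p+1)) c := by
  rw [List.drop_eq_getElem_cons h]
  simp only [colT, List.filterMap_cons]
  split_ifs with hv <;> simp

lemma advB_found (board : List (List Int)) (c : Int) (jn : Nat) (p : Nat)
    (hrow : ∀ row ∈ board, PySem.List.pyGetD row c 0 = row.getD jn 0)
    (h : advB board c p < board.length) :
    (board[advB board c p]'h).getD jn 0 ≠ 0 := by
  fun_induction advB board c p with
  | case1 p h' hv ih => exact ih h
  | case2 p h' hv =>
      rw [hrow _ (List.getElem_mem h')] at hv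
      simpa using hv
  | case3 p h' => omega

lemma advB_colT (board : List (List Int)) (c : Int) (jn : Nat) (p : Nat)
    (hrow : ∀ row ∈ board, PySem.List.pyGetD row c 0 = row.getD jn 0) :
    colT (board.drop p) jn = colT (board.drop (advB board c p)) jn := by
  fun_induction advB board c p with
  | case1 p h hv ih =>
      rw [hrow _ (List.getElem_mem h)] at hv
      rw [colT_drop_cons board jn p h, if_neg (by simpa using hv), List.nil_append]
      exact ih
  | case2 p h hv => rfl
  | case3 p h => rfl

-- A's inner (per-row) loop over the columns, as a function of the row
def rowStep (C : Nat) (st : List (List Int)) (row : List Int) : List (List Int) :=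
  (PySem.List.pyRange 0 (C : Int) 1).foldl (fun st2 col =>
    let v := PySem.List.pyGetD row col 0
    if v ≠ 0 then
      PySem.List.pySetD st2 col (PySem.List.pyGetD st2 col [] ++ [v])
    else st2) st

lemma rowStep_length (C : Nat) (st : List (List Int)) (row : List Int) :
    (rowStep C st row).length = st.length := by
  unfold rowStep
  generalize PySem.List.pyRange 0 (C : Int) 1 = l
  induction l generalizing st with
  | nil => rfl
  | cons x xs ih =>
      simp only [List.foldl_cons]
      split_ifs
      · rw [ih, PySem.List.length_pySetD]
      · rw [ih]

lemma rowStep_aux (C : Nat) (row : List Int) (k : Nat) :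
    ∀ (a : Nat) (st : List (List Int)), C - a = k → st.length = C → ∀ (j : Nat),
    ((PySem.List.pyRange (a : Int) (C : Int) 1).foldl (fun st2 col =>
        let v := PySem.List.pyGetD row col 0
        if v ≠ 0 then
          PySem.List.pySetD st2 col (PySem.List.pyGetD st2 col [] ++ [v])
        else st2) st).getD j [] =
      if a ≤ j ∧ j < C ∧ row.getD j 0 ≠ 0 then st.getD j [] ++ [row.getD j 0] else st.getD j [] := by
  induction k with
  | zero =>
      intro a st hk hl j
      rw [PySem.List.pyRange_one_eq_nil (by omega)]
      simp only [List.foldl_nil]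
      rw [if_neg (by omega)]
  | succ k ih =>
      intro a st hk hl j
      rw [PySem.List.pyRange_one_cons (by omega : (a : Int) < (C : Int))]
      simp only [List.foldl_cons]
      have hcast : ((a : Int) + 1) = ((a + 1 : Nat) : Int) := by push_cast; ring
      have hga : PySem.List.pyGetD row (a : Int) 0 = row.getD a 0 := by
        simp [PySem.List.pyGetD_natCast]
      by_cases hv : row.getD a 0 ≠ 0
      · rw [if_pos (by simpa [hga] using hv)]
        have hset : PySem.List.pySetD st (a : Int) (PySem.List.pyGetD st (a : Int) [] ++ [PySem.List.pyGetD row (a : Int) 0])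
            = st.set a (st.getD a [] ++ [row.getD a 0]) := by
          rw [PySem.List.pySetD_of_nonneg _ _ (by positivity)]
          simp [hga]
        rw [hset, hcast, ih (a + 1) _ (by omega) (by simp [hl])]
        rw [getD_set st a j (st.getD a [] ++ [row.getD a 0]) [] (by omega)]
        by_cases hja : a = j
        · subst hja
          rw [if_neg (fun hcon => absurd hcon.1 (by omega)), if_pos rfl,
              if_pos ⟨le_refl a, by omega, hv⟩]
        · rw [if_neg hja]
          by_cases hcond : a + 1 ≤ j ∧ j < C ∧ row.getD j 0 ≠ 0
          · rw [if_pos hcond, if_pos ⟨by omega, hcond.2⟩]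
          · rw [if_neg hcond, if_neg (fun hc => hcond ⟨by
              have h1 := hc.1
              omega, hc.2⟩)]
      · rw [ne_eq, not_not] at hv
        rw [if_neg (by simp only [ne_eq, not_not, hga]; simpa [List.getD] using hv)]
        rw [hcast, ih (a + 1) _ (by omega) hl]
        by_cases hcond : a + 1 ≤ j ∧ j < C ∧ row.getD j 0 ≠ 0
        · rw [if_pos hcond, if_pos ⟨by omega, hcond.2⟩]
        · rw [if_neg hcond, if_neg (fun hc => hcond ⟨by
            by_cases he : a = j
            · exact absurd (he ▸ hv) hc.2.2
            · have h1 := hc.1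
              omega, hc.2⟩)]

lemma rowStep_getD (C : Nat) (row : List Int) (st : List (List Int)) (hl : st.length = C) (j : Nat) :
    (rowStep C st row).getD j [] =
      if j < C ∧ row.getD j 0 ≠ 0 then st.getD j [] ++ [row.getD j 0] else st.getD j [] := by
  have := rowStep_aux C row C 0 st (by omega) hl j
  unfold rowStep
  rw [show ((0 : Nat) : Int) = (0 : Int) by norm_num] at this
  rw [this]
  by_cases h : j < C ∧ row.getD j 0 ≠ 0
  · rw [if_pos ⟨by omega, h⟩, if_pos h]
  · rw [if_neg (fun hc => h ⟨hc.2.1, hc.2.2⟩), if_neg h]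

lemma foldr_rowStep_length (C : Nat) (rows : List (List Int)) (st : List (List Int)) :
    (rows.foldr (fun row st => rowStep C st row) st).length = st.length := by
  induction rows with
  | nil => rfl
  | cons r rs ih => simp [List.foldr_cons, rowStep_length, ih]

lemma foldr_rowStep_getD (C : Nat) (rows : List (List Int)) (st : List (List Int))
    (hl : st.length = C) (j : Nat) (hj : j < C) :
    (rows.foldr (fun row st => rowStep C st row) st).getD j [] =
      st.getD j [] ++ (colT rows j).reverse := by
  induction rows with
  | nil => simp [colT]
  | cons r rs ih =>
      simp only [List.foldr_cons]
      rw [rowStep_getD C r _ (by rw [foldr_rowStep_length, hl]) j, ih]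
      simp only [colT, List.filterMap_cons]
      by_cases hv : r.getD j 0 ≠ 0
      · rw [if_pos ⟨hj, hv⟩, if_pos hv]
        simp [List.append_assoc]
      · rw [if_neg (fun hc => hv hc.2), if_neg hv]

lemma buildA_eq (board : List (List Int)) :
    buildA board = board.foldr (fun row st => rowStep (board.headD []).length st row)
      ((PySem.List.pyRange 0 ((board.headD []).length : Int) 1).map (fun _ => ([] : List Int))) := by
  unfold buildA rowStep
  have h2 := PySem.List.map_pyGetD_pyRange_zero board ([] : List Int)
  rw [PySem.List.len_eq] at h2
  have h1 : PySem.List.pyRange ((board.length : Int) - 1) (-1) (-1)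
      = (PySem.List.pyRange 0 (board.length : Int) 1).reverse := by
    rw [PySem.List.pyRange_neg_one_eq_reverse]
    norm_num
  rw [h1, List.foldl_reverse]
  generalize (board.headD []).length = Cn
  conv_rhs => rw [← h2]
  rw [List.foldr_map]

-- the loop invariant relating A's stacks to B's pointers, pushed through the moves fold
lemma moves_loop (board : List (List Int)) (Cn : Nat) (hC : Cn = (board.headD []).length)
    (hwide : ∀ row ∈ board, Cn ≤ row.length)
    (moves : List Int)
    (hm : ∀ n ∈ moves, -(Cn : Int) ≤ n - 1 ∧ n - 1 < (Cn : Int))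
    (huni : ∀ n ∈ moves, n - 1 < 0 → ∀ row ∈ board, row.length = Cn) :
    ∀ (stack : List (List Int)) (ptr : List Nat) (basket : List Int) (res : Int),
    stack.length = Cn → ptr.length = Cn →
    (∀ j, j < Cn → stack.getD j [] = (colT (board.drop (ptr.getD j 0)) j).reverse) →
    (moves.foldl stepA (stack, basket, res)).2 =
      (moves.foldl (stepB board) (ptr, basket, res)).2 := by
  induction moves with
  | nil => intro stack ptr basket res _ _ _; rfl
  | cons n rest ih =>
      intro stack ptr basket res hs hp hinv
      have hn := hm n (by simp)
      have hmr : ∀ m ∈ rest, -(Cn : Int) ≤ m - 1 ∧ m - 1 < (Cn : Int) :=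
        fun m hm' => hm m (by simp [hm'])
      have hunir : ∀ m ∈ rest, m - 1 < 0 → ∀ row ∈ board, row.length = Cn :=
        fun m hm' => huni m (by simp [hm'])
      simp only [List.foldl_cons]
      -- the resolved (non-negative) column index both sides select
      set jn : Nat := (if n - 1 < 0 then n - 1 + (Cn : Int) else n - 1).toNat with hjn
      have hjC : jn < Cn := by rw [hjn]; split_ifs <;> omega
      have hgetA : PySem.List.pyGetD stack (n - 1) [] = stack.getD jn [] := by
        rw [pyGetD_inrange _ _ _ (by omega) (by omega), hjn, hs]
      have hsetA : ∀ v, PySem.List.pySetD stack (n - 1) v = stack.set jn v := by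
        intro v
        rw [pySetD_inrange _ _ _ (by omega) (by omega), hjn, hs]
      have hgetB : PySem.List.pyGetD ptr (n - 1) 0 = ptr.getD jn 0 := by
        rw [pyGetD_inrange _ _ _ (by omega) (by omega), hjn, hp]
      have hsetB : ∀ v, PySem.List.pySetD ptr (n - 1) v = ptr.set jn v := by
        intro v
        rw [pySetD_inrange _ _ _ (by omega) (by omega), hjn, hp]
      have hrow : ∀ row ∈ board, PySem.List.pyGetD row (n - 1) 0 = row.getD jn 0 := by
        intro row hr
        by_cases hneg : n - 1 < 0
        · have hlen : row.length = Cn := huni n (by simp) hneg row hr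
          rw [pyGetD_inrange _ _ _ (by omega) (by omega), hjn, hlen]
        · have hle := hwide row hr
          rw [pyGetD_nonneg_getD _ _ _ (by omega), hjn]
          congr 1
          split_ifs <;> omega
      set p : Nat := ptr.getD jn 0 with hpdef
      set q : Nat := advB board (n - 1) p with hq
      have hcol : colT (board.drop p) jn = colT (board.drop q) jn :=
        advB_colT board (n - 1) jn p hrow
      have hsval : stack.getD jn [] = (colT (board.drop p) jn).reverse := hinv jn hjC
      show (rest.foldl stepA (stepA (stack, basket, res) n)).2 =
        (rest.foldl (stepB board) (stepB board (ptr, basket, res) n)).2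
      by_cases hfound : q < board.length
      · -- a doll is found in this column
        have hd := advB_found board (n - 1) jn p hrow (hq ▸ hfound)
        set d : Int := (board[q]'hfound).getD jn 0 with hdv
        have hcolq : colT (board.drop q) jn = d :: colT (board.drop (q + 1)) jn := by
          rw [colT_drop_cons board jn q hfound, if_pos (by exact hd)]
          rfl
        have hsnn : stack.getD jn [] = (colT (board.drop (q + 1)) jn).reverse ++ [d] := by
          rw [hsval, hcol, hcolq]; simp
        have hstepA : stepA (stack, basket, res) n =
            (stack.set jn (colT (board.drop (q + 1)) jn).reverse,
              if basket ≠ [] ∧ PySem.List.pyGetD basket (-1) 0 = d then basket.dropLast else basket ++ [d],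
              if basket ≠ [] ∧ PySem.List.pyGetD basket (-1) 0 = d then res + 2 else res) := by
          show (let s := PySem.List.pyGetD stack (n - 1) []
            if s ≠ [] then
              let d := PySem.List.pyGetD s (-1) 0
              let stack' := PySem.List.pySetD stack (n - 1) s.dropLast
              if basket ≠ [] ∧ PySem.List.pyGetD basket (-1) 0 = d then
                (stack', basket.dropLast, res + 2)
              else (stack', basket ++ [d], res)
            else (stack, basket, res)) = _
          simp only [hgetA, hsnn]
          rw [if_pos (by simp)]
          rw [PySem.List.pyGetD_neg_one_append_singleton]
          rw [List.dropLast_concat, hsetA]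
          split_ifs <;> rfl
        have hstepB : stepB board (ptr, basket, res) n =
            (ptr.set jn (q + 1),
              if basket ≠ [] ∧ PySem.List.pyGetD basket (-1) 0 = d then basket.dropLast else basket ++ [d],
              if basket ≠ [] ∧ PySem.List.pyGetD basket (-1) 0 = d then res + 2 else res) := by
          show (let c : Int := n - 1
            let p := advB board c (PySem.List.pyGetD ptr c 0)
            if h : p < board.length then
              let d := PySem.List.pyGetD (board[p]'h) c 0
              let ptr' := PySem.List.pySetD ptr c (p + 1)
              if basket ≠ [] ∧ PySem.List.pyGetD basket (-1) 0 = d then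
                (ptr', basket.dropLast, res + 2)
              else (ptr', basket ++ [d], res)
            else (PySem.List.pySetD ptr c p, basket, res)) = _
          simp only [hgetB]
          rw [dif_pos hfound, hsetB, hrow _ (List.getElem_mem hfound), ← hdv]
          split_ifs <;> rfl
        rw [hstepA, hstepB]
        split_ifs with hbr
        · exact ih hmr hunir _ _ _ _ (by simp [hs]) (by simp [hp])
            (fun j hj => by
              rw [getD_set _ _ _ _ _ (by omega), getD_set _ _ _ _ _ (by omega)]
              split_ifs with hje
              · subst hje; rfl
              · exact hinv j hj)
        · exact ih hmr hunir _ _ _ _ (by simp [hs]) (by simp [hp])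
            (fun j hj => by
              rw [getD_set _ _ _ _ _ (by omega), getD_set _ _ _ _ _ (by omega)]
              split_ifs with hje
              · subst hje; rfl
              · exact hinv j hj)
      · -- the column is exhausted: A's stack is empty, B records the stopped pointer
        have hempty : colT (board.drop q) jn = [] := by
          rw [List.drop_eq_nil_of_le (by omega)]; rfl
        have hse : stack.getD jn [] = [] := by rw [hsval, hcol, hempty]; rfl
        have hstepA : stepA (stack, basket, res) n = (stack, basket, res) := by
          show (let s := PySem.List.pyGetD stack (n - 1) []
            if s ≠ [] then
              let d := PySem.List.pyGetD s (-1) 0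
              let stack' := PySem.List.pySetD stack (n - 1) s.dropLast
              if basket ≠ [] ∧ PySem.List.pyGetD basket (-1) 0 = d then
                (stack', basket.dropLast, res + 2)
              else (stack', basket ++ [d], res)
            else (stack, basket, res)) = _
          simp only [hgetA, hse]
          rw [if_neg (by simp)]
        have hstepB : stepB board (ptr, basket, res) n = (ptr.set jn q, basket, res) := by
          show (let c : Int := n - 1
            let p := advB board c (PySem.List.pyGetD ptr c 0)
            if h : p < board.length then
              let d := PySem.List.pyGetD (board[p]'h) c 0
              let ptr' := PySem.List.pySetD ptr c (p + 1)
              if basket ≠ [] ∧ PySem.List.pyGetD basket (-1) 0 = d then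
                (ptr', basket.dropLast, res + 2)
              else (ptr', basket ++ [d], res)
            else (PySem.List.pySetD ptr c p, basket, res)) = _
          simp only [hgetB]
          rw [dif_neg hfound, hsetB]
        rw [hstepA, hstepB]
        exact ih hmr hunir _ _ _ _ hs (by simp [hp])
          (fun j hj => by
            rw [getD_set _ _ _ _ _ (by omega)]
            split_ifs with hje
            · subst hje; rw [hse, hempty]; rfl
            · exact hinv j hj)

-- ===== VERDICT (by name: the statement is the Claim_ definition above) =====
theorem solution_spec : Claim_equal_solution := by
  intro board moves _ hpre
  unfold Spec_solution solution solution_alt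
  set Cn : Nat := (board.headD []).length with hCn
  have hinit : ∀ j, j < Cn →
      (buildA board).getD j [] =
        (colT (board.drop ((List.replicate Cn (0 : Nat)).getD j 0)) j).reverse := by
    intro j hj
    rw [buildA_eq, foldr_rowStep_getD Cn board _ (by simp [hCn, List.headD_eq_head?_getD]) j hj]
    rw [getD_map_const, getD_replicate, List.drop_zero]
    simp
  have hlenb : (buildA board).length = Cn := by
    rw [buildA_eq, foldr_rowStep_length]
    simp [hCn, List.headD_eq_head?_getD]
  have hwide : ∀ row ∈ board, Cn ≤ row.length := hpre.2.1
  have huni : ∀ n ∈ moves, n - 1 < 0 → ∀ row ∈ board, row.length = Cn := by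
    intro n hn hneg row hr
    exact hpre.2.2.2 ⟨n, hn, by omega⟩ row hr
  have := moves_loop board Cn hCn hwide moves (fun n hn => hpre.2.2.1 n hn) huni
    (buildA board) (List.replicate Cn (0 : Nat)) [] 0 hlenb (by simp) hinit
  exact congrArg Prod.snd this
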